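-- pv_equiv track=rewrite | github.com/ShirazAdam/IBM-Quantum | TSP.py | decode_bitstring
-- ===== SOURCE A (Python) =====
-- def decode_bitstring(bitstring: str, n_cities: int) -> list[int]:
--     tour: list[int] = []
--     for j in range(n_cities):
--         found: bool = False
--         for i in range(n_cities):
--             idx: int = i * n_cities + j
--             if (
--                 idx < len(bitstring) and bitstring[-(idx + 1)] == "1"
--             ):  # Reverse indexing
--                 tour.append(i)
--                 found = True
--                 break
--         if not found:
--             tour.append(-1)
--     return tour
-- ===== SOURCE B (Python) =====
-- def decode_bitstring(bitstring: str, n_cities: int) -> list[int]: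
--     if n_cities <= 0:
--         return []
--     tour_of: dict[int, int] = {}
--     for idx, ch in enumerate(reversed(bitstring)):
--         if ch == "1":
--             i, j = divmod(idx, n_cities)
--             if i < n_cities and j not in tour_of:
--                 tour_of[j] = i
--     return [tour_of.get(j, -1) for j in range(n_cities)]
-- ===== Notes on version B (the rewrite author's own statement) =====
-- stated objective: faster
-- what changed: A scans, for every column j, rows i = 0..n-1 with an inner break (quadratic in n_cities regardless of bitstring length); B instead makes one pass over the reversed bitstring, recording for each '1' at position idx the first row idx//n seen per column idx%n in a dict, then reads the tour off the dict.
import Mathlib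
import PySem

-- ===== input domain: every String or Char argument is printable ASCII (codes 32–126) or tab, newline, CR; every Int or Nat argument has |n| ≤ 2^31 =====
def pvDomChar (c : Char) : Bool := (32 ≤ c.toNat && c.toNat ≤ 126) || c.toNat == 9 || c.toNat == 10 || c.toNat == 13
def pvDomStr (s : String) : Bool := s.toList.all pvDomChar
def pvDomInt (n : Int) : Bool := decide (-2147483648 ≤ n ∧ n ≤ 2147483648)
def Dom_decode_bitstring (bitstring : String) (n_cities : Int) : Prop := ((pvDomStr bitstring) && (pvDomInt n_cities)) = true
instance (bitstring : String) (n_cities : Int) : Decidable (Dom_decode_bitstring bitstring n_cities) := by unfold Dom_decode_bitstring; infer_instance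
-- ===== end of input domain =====

-- B replaces A's nested column-by-row scans with a single pass over the reversed
-- bitstring that records the first row seen for each column in a dict (objective: alternative).


-- ===== PORT A =====
-- inner 'for i in range(n_cities): … break' of A, as a first-match recursion
def aFind (bitstring : String) (n_cities : Int) (j : Int) : List Int → Option Int
  | [] => none
  | i :: rest =>
      if i * n_cities + j < PySem.Str.len bitstring ∧
          PySem.Str.pyGet? bitstring (-(i * n_cities + j + 1)) = some '1'
      then some i
      else aFind bitstring n_cities j rest

def decode_bitstring (bitstring : String) (n_cities : Int) : List Int :=
  (PySem.List.pyRange 0 n_cities 1).foldl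
    (fun tour j =>
      match aFind bitstring n_cities j (PySem.List.pyRange 0 n_cities 1) with
      | some i => tour ++ [i]
      | none => tour ++ [-1]) []

-- ===== PORT B =====
def decode_bitstring_alt (bitstring : String) (n_cities : Int) : List Int :=
  if n_cities ≤ 0 then []
  else
    let d := (PySem.List.enumerate bitstring.toList.reverse).foldl
      (fun d (p : Int × Char) =>
        if p.2 = '1' then
          if PySem.Int.floordiv p.1 n_cities < n_cities ∧
              d.contains (PySem.Int.mod p.1 n_cities) = false
          then d.insert (PySem.Int.mod p.1 n_cities) (PySem.Int.floordiv p.1 n_cities)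
          else d
        else d) PySem.Dict.empty
    (PySem.List.pyRange 0 n_cities 1).map (fun j => d.getD j (-1))

-- ===== PRECONDITION & SPEC =====
def Spec_decode_bitstring (bitstring : String) (n_cities : Int) (out : List Int) : Prop := out = decode_bitstring_alt bitstring n_cities
instance (bitstring : String) (n_cities : Int) (out : List Int) : Decidable (Spec_decode_bitstring bitstring n_cities out) := by unfold Spec_decode_bitstring; infer_instance

-- ===== CLAIM (what is proved, stated in full; the proofs are below) =====
def Claim_equal_decode_bitstring : Prop := ∀ (bitstring : String) (n_cities : Int), Dom_decode_bitstring bitstring n_cities → Spec_decode_bitstring bitstring n_cities (decode_bitstring bitstring n_cities)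

-- ===== LEMMAS AND PROOFS =====

-- find? only depends on the predicate's values on the list
theorem pv_find?_ext {α : Type} (p q : α → Bool) (l : List α) (h : ∀ x ∈ l, p x = q x) :
    l.find? p = l.find? q := by
  induction l with
  | nil => rfl
  | cons a l ih =>
      have ha := h a (by simp)
      by_cases hpa : p a = true
      · rw [List.find?_cons_of_pos hpa, List.find?_cons_of_pos (ha ▸ hpa)]
      · rw [List.find?_cons_of_neg hpa, List.find?_cons_of_neg (ha ▸ hpa)]
        exact ih (fun x hx => h x (by simp [hx]))

-- A's outer loop (append one entry per column) is a map
theorem pv_foldl_opt {α : Type} (F : α → Option Int) (l : List α) (init : List Int) :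
    l.foldl (fun tour j => match F j with | some i => tour ++ [i] | none => tour ++ [-1]) init
      = init ++ l.map (fun j => (F j).getD (-1)) := by
  induction l generalizing init with
  | nil => simp
  | cons a l ih =>
      simp only [List.foldl_cons, List.map_cons]
      cases h : F a <;> simp [ih]

-- A's inner loop with break is a first match
theorem pv_aFind_eq (bs : String) (n j : Int) (l : List Int) :
    aFind bs n j l
      = l.find? (fun i => decide (i * n + j < PySem.Str.len bs ∧
          PySem.Str.pyGet? bs (-(i * n + j + 1)) = some '1')) := by
  induction l with
  | nil => rfl
  | cons a l ih =>
      rw [show aFind bs n j (a :: l)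
          = (if a * n + j < PySem.Str.len bs ∧ PySem.Str.pyGet? bs (-(a * n + j + 1)) = some '1'
             then some a else aFind bs n j l) from rfl]
      by_cases h : a * n + j < PySem.Str.len bs ∧ PySem.Str.pyGet? bs (-(a * n + j + 1)) = some '1'
      · rw [if_pos h, List.find?_cons_of_pos]
        exact decide_eq_true h
      · rw [if_neg h, ih, List.find?_cons_of_neg]
        exact fun hc => h (of_decide_eq_true hc)

-- B's dict loop keeps, for each column, the first matching row of the scan
theorem pv_dict_get (n j : Int) (l : List (Int × Char)) : ∀ (d : PySem.Dict Int Int),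
    (l.foldl (fun d (p : Int × Char) =>
        if p.2 = '1' then
          if PySem.Int.floordiv p.1 n < n ∧ d.contains (PySem.Int.mod p.1 n) = false
          then d.insert (PySem.Int.mod p.1 n) (PySem.Int.floordiv p.1 n)
          else d
        else d) d).get? j
      = (d.get? j).or ((l.find? (fun p => decide (p.2 = '1' ∧ PySem.Int.floordiv p.1 n < n ∧
            PySem.Int.mod p.1 n = j))).map (fun p => PySem.Int.floordiv p.1 n)) := by
  induction l with
  | nil => intro d; simp
  | cons p l ih =>
      intro d
      simp only [List.foldl_cons]
      by_cases hch : p.2 = '1'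
      · by_cases hc : PySem.Int.floordiv p.1 n < n ∧ d.contains (PySem.Int.mod p.1 n) = false
        · rw [if_pos hch, if_pos hc, ih]
          by_cases hjj : PySem.Int.mod p.1 n = j
          · have hdj : d.get? j = none := by
              rw [PySem.Dict.get?_eq_none_iff_contains]; rw [← hjj]; exact hc.2
            rw [List.find?_cons_of_pos (by simp [hch, hc.1, hjj]),
                hjj, PySem.Dict.get?_insert_self]
            simp [hdj]
          · rw [List.find?_cons_of_neg (by simp [hjj]),
                PySem.Dict.get?_insert_of_ne _ _ (fun h => hjj h.symm)]
        · rw [if_pos hch, if_neg hc, ih]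
          by_cases hjj : PySem.Int.floordiv p.1 n < n ∧ PySem.Int.mod p.1 n = j
          · have hcont : d.contains j = true := by
              rcases Bool.eq_false_or_eq_true (d.contains (PySem.Int.mod p.1 n)) with h | h
              · rw [← hjj.2]; exact h
              · exact absurd ⟨hjj.1, h⟩ hc
            obtain ⟨v, hv⟩ : ∃ v, d.get? j = some v := by
              cases hg : d.get? j with
              | none => rw [PySem.Dict.get?_eq_none_iff_contains] at hg; rw [hg] at hcont; cases hcont
              | some v => exact ⟨v, rfl⟩
            rw [List.find?_cons_of_pos (by simp [hch, hjj.1, hjj.2])]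
            simp [hv]
          · rw [List.find?_cons_of_neg (by simpa [hch] using fun a b => hjj ⟨a, b⟩)]
      · rw [if_neg hch, ih, List.find?_cons_of_neg (by simp [hch])]

-- first match in range L, characterised
theorem pv_find?_range_some (P : Nat → Bool) (L a : Nat) :
    (List.range L).find? P = some a ↔ a < L ∧ P a = true ∧ ∀ b, b < a → P b = false := by
  rw [List.find?_eq_some_iff_getElem]
  simp only [List.getElem_range, List.length_range]
  constructor
  · rintro ⟨hPa, i, hi, rfl, hmin⟩
    exact ⟨hi, hPa, fun b hb => by simpa using hmin b hb⟩
  · rintro ⟨ha, hPa, hmin⟩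
    exact ⟨hPa, a, ha, rfl, fun jj hj => by simp [hmin jj hj]⟩

-- core: scanning all positions of the reversed string for column j', keeping the first,
-- equals scanning rows k = 0..n'-1 at positions k*n'+j'
theorem pv_core (P : Nat → Bool) (L n' j' : Nat) (hn : 0 < n') (hj : j' < n') :
    (List.range L).find? (fun m => decide (m / n' < n' ∧ m % n' = j') && P m)
      = ((List.range n').find? (fun k => decide (k * n' + j' < L) && P (k * n' + j'))).map
          (fun k => k * n' + j') := by
  rcases h : (List.range n').find? (fun k => decide (k * n' + j' < L) && P (k * n' + j')) with _ | k
  · rw [List.find?_eq_none] at h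
    simp only [Option.map_none]
    rw [List.find?_eq_none]
    intro m hm hPm
    simp only [List.mem_range] at hm
    simp only [Bool.and_eq_true, decide_eq_true_eq] at hPm
    obtain ⟨⟨hdiv, hmod⟩, hPm⟩ := hPm
    have hrep : (m / n') * n' + j' = m := by
      have h1 := Nat.div_add_mod m n'
      have h2 : m / n' * n' = n' * (m / n') := Nat.mul_comm _ _
      omega
    have := h (m / n') (by simpa [List.mem_range] using hdiv)
    rw [hrep] at this
    simp [hm, hPm] at this
  · rw [pv_find?_range_some] at h
    obtain ⟨hkn, hk, hmin⟩ := h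
    simp only [Bool.and_eq_true, decide_eq_true_eq] at hk
    obtain ⟨hkL, hPk⟩ := hk
    simp only [Option.map_some]
    rw [pv_find?_range_some]
    have hdivk : (k * n' + j') / n' = k := by
      rw [Nat.mul_comm k n', Nat.mul_add_div hn, Nat.div_eq_of_lt hj, Nat.add_zero]
    have hmodk : (k * n' + j') % n' = j' := by
      have := Nat.mul_add_mod n' k j'
      rw [Nat.mul_comm n' k] at this
      rw [this, Nat.mod_eq_of_lt hj]
    refine ⟨hkL, by rw [hdivk, hmodk, hPk, Bool.and_true]; exact decide_eq_true ⟨hkn, rfl⟩, ?_⟩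
    intro b hb
    rcases Bool.eq_false_or_eq_true (decide (b / n' < n' ∧ b % n' = j') && P b) with ht | hf
    · exfalso
      simp only [Bool.and_eq_true, decide_eq_true_eq] at ht
      obtain ⟨⟨hdiv, hmod⟩, hPb⟩ := ht
      have hrep : (b / n') * n' + j' = b := by
        have h1 := Nat.div_add_mod b n'
        have h2 : b / n' * n' = n' * (b / n') := Nat.mul_comm _ _
        omega
      have hqk : b / n' < k := by
        have : (b / n') * n' < k * n' := by omega
        exact Nat.lt_of_mul_lt_mul_right this
      have hm2 := hmin (b / n') hqk
      rw [hrep] at hm2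
      simp only [Bool.and_eq_false_iff, decide_eq_false_iff_not] at hm2
      rcases hm2 with h | h
      · omega
      · rw [hPb] at h; cases h
    · exact hf

-- the per-column value of A equals the per-column value of B's dict
theorem pv_perj (bs : String) (n' j' : Nat) (hn : 0 < n') (hj : j' < n') :
    (aFind bs (↑n') (↑j') (PySem.List.pyRange 0 (↑n') 1)).getD (-1)
      = (((PySem.List.enumerate bs.toList.reverse).foldl
          (fun d (p : Int × Char) =>
            if p.2 = '1' then
              if PySem.Int.floordiv p.1 (↑n') < (↑n') ∧
                  d.contains (PySem.Int.mod p.1 (↑n')) = false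
              then d.insert (PySem.Int.mod p.1 (↑n')) (PySem.Int.floordiv p.1 (↑n'))
              else d
            else d) PySem.Dict.empty).getD (↑j') (-1)) := by
  -- B side
  rw [PySem.Dict.getD_eq_get?_getD, pv_dict_get, PySem.Dict.get?_empty, Option.none_or]
  rw [PySem.List.enumerate_eq_map_pyRange bs.toList.reverse '0']
  rw [PySem.List.len_eq, List.length_reverse]
  -- A side
  rw [pv_aFind_eq]
  rw [PySem.List.pyRange_zero_natCast bs.toList.length, PySem.List.pyRange_zero_natCast n']
  simp only [List.find?_map, Option.map_map]
  -- common abbreviation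
  set P : Nat → Bool := fun m => decide (PySem.List.pyGetD bs.toList.reverse (↑m) '0' = '1') with hP
  have hBpred : ∀ m ∈ List.range bs.toList.length,
      (((fun p : Int × Char => decide (p.2 = '1' ∧ PySem.Int.floordiv p.1 (↑n') < (↑n') ∧
          PySem.Int.mod p.1 (↑n') = (↑j'))) ∘
        (fun j : Int => (j, PySem.List.pyGetD bs.toList.reverse j '0'))) ∘ (fun k : Nat => (↑k : Int))) m
      = (decide (m / n' < n' ∧ m % n' = j') && P m) := by
    intro m hm
    show decide (PySem.List.pyGetD bs.toList.reverse (↑m) '0' = '1' ∧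
          PySem.Int.floordiv (↑m) (↑n') < (↑n') ∧ PySem.Int.mod (↑m) (↑n') = (↑j'))
        = (decide (m / n' < n' ∧ m % n' = j') &&
            decide (PySem.List.pyGetD bs.toList.reverse (↑m) '0' = '1'))
    rw [← Bool.decide_and, decide_eq_decide, PySem.Int.floordiv_natCast, PySem.Int.mod_natCast]
    constructor
    · rintro ⟨h1, h2, h3⟩
      exact ⟨⟨by exact_mod_cast h2, by exact_mod_cast h3⟩, h1⟩
    · rintro ⟨⟨h2, h3⟩, h1⟩
      exact ⟨h1, by exact_mod_cast h2, by exact_mod_cast h3⟩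
  have hApred : ∀ k ∈ List.range n',
      ((fun i : Int => decide (i * (↑n') + (↑j') < PySem.Str.len bs ∧
          PySem.Str.pyGet? bs (-(i * (↑n') + (↑j') + 1)) = some '1')) ∘ (fun k : Nat => (↑k : Int))) k
      = (decide (k * n' + j' < bs.toList.length) && P (k * n' + j')) := by
    intro k hk
    show decide ((↑k : Int) * (↑n') + (↑j') < PySem.Str.len bs ∧
          PySem.Str.pyGet? bs (-((↑k : Int) * (↑n') + (↑j') + 1)) = some '1')
        = (decide (k * n' + j' < bs.toList.length) &&
            decide (PySem.List.pyGetD bs.toList.reverse (↑(k * n' + j')) '0' = '1'))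
    rw [← Bool.decide_and, decide_eq_decide, PySem.Str.len_eq]
    have hcast : ((↑k : Int) * (↑n') + (↑j') : Int) = ((k * n' + j' : Nat) : Int) := by
      push_cast; ring
    rw [hcast]
    by_cases hm : k * n' + j' < bs.toList.length
    · have hA1 : PySem.Str.pyGet? bs (-((((k * n' + j' : Nat) : Int)) + 1))
          = bs.toList[bs.toList.length - 1 - (k * n' + j')]? := by
        rw [PySem.Str.pyGet?_eq, PySem.Chars.pyGet?_eq_listPyGet?,
            show (-((((k * n' + j' : Nat) : Int)) + 1)) = -(((k * n' + j' + 1 : Nat) : Int)) by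
              push_cast; ring,
            PySem.List.pyGet?_neg_natCast bs.toList (k * n' + j' + 1) (by omega) (by omega),
            show bs.toList.length - (k * n' + j' + 1) = bs.toList.length - 1 - (k * n' + j') by omega]
      have hB1 : PySem.List.pyGetD bs.toList.reverse (↑(k * n' + j')) '0'
          = (bs.toList[bs.toList.length - 1 - (k * n' + j')]?).getD '0' := by
        rw [PySem.List.pyGetD_of_nonneg _ _ (by positivity)]
        simp only [Int.toNat_natCast]
        rw [List.getD_eq_getElem?_getD, List.getElem?_reverse (by simpa using hm)]
      rw [hA1, hB1, List.getElem?_eq_getElem (by omega)]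
      constructor
      · rintro ⟨-, h2⟩
        exact ⟨hm, by simpa using h2⟩
      · rintro ⟨-, h2⟩
        exact ⟨by exact_mod_cast hm, by simpa using h2⟩
    · have h1 : ¬ (((k * n' + j' : Nat) : Int) < ((bs.toList.length : Nat) : Int)) := by
        exact_mod_cast hm
      constructor
      · rintro ⟨h2, -⟩; exact absurd h2 h1
      · rintro ⟨h2, -⟩; exact absurd h2 hm
  rw [pv_find?_ext _ _ _ hBpred, pv_find?_ext _ _ _ hApred]
  rw [pv_core P bs.toList.length n' j' hn hj]
  rw [Option.map_map]
  congr 1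
  apply Option.map_congr
  intro k _
  simp only [Function.comp_apply]
  rw [PySem.Int.floordiv_natCast]
  have hdivk : (k * n' + j') / n' = k := by
    rw [Nat.mul_comm k n', Nat.mul_add_div hn, Nat.div_eq_of_lt hj]
    omega
  rw [hdivk]

-- ===== VERDICT (by name: the statement is the Claim_ definition above) =====
theorem decode_bitstring_spec : Claim_equal_decode_bitstring := by
  intro bs n _
  unfold Spec_decode_bitstring decode_bitstring decode_bitstring_alt
  by_cases hn : n ≤ 0
  · rw [if_pos hn, PySem.List.pyRange_one_eq_nil hn]
    rfl
  · rw [if_neg hn]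
    replace hn : 0 < n := by omega
    rw [pv_foldl_opt (fun j => aFind bs n j (PySem.List.pyRange 0 n 1))]
    rw [List.nil_append]
    apply List.map_congr_left
    intro j hj
    rw [PySem.List.mem_pyRange_one] at hj
    have hn' : n = ((n.toNat : Nat) : Int) := by omega
    have hj' : j = ((j.toNat : Nat) : Int) := by omega
    rw [hn', hj']
    exact pv_perj bs n.toNat j.toNat (by omega) (by omega)
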